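-- pv_equiv track=rewrite | github.com/norasit/test_de_role_pt1 | src/test_4.py | word_mesh
-- ===== SOURCE A (Python) =====
-- def word_mesh(words: list[str]):
--     # Write your code here.
--     """
--     input list of string and process each pair of elements that next to each other
--     """
--     # Check for there are at least 2 elements is list
--     if len(words) < 2:
--         raise ValueError("The list must contain at least 2 elements.")
--
--     # Verify that all elements is string type
--     if not all(isinstance(element, str) for element in words):
--         raise TypeError("All elements in the list must be strings.")
--
--     def sub_string_forward(word: str):
--         # Create sub-string forward
--         return [word[idx:] for idx in range(len(word))]
--
--     def sub_string_backward(word: str):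
--         # Create sub-string backward
--         return [word[:idx] for idx in range(1, len(word) + 1)]
--
--     def find_max_match(forward_list, backward_list):
--         # Find maximum length match
--         matching = set(forward_list) & set(backward_list)
--         return max(matching, key=len, default="")  # return maximum string or blanl string if there is no match string
--
--     # process pair of elements that next to each other
--     result_string = ""
--     for i in range(len(words) - 1):
--         forward_substrings = sub_string_forward(words[i])
--         backward_substrings = sub_string_backward(words[i + 1])
--         match_string = find_max_match(forward_substrings, backward_substrings)
--
--         # if there is no match
--         if match_string == "":
--             return "failed to mesh"
--
--         result_string += match_string  # combine match string from each pair
--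
--     return result_string
-- ===== SOURCE B (Python) =====
-- def word_mesh(words: list[str]):
--     # Direct descending overlap scan per adjacent pair (no substring sets),
--     # collecting the pieces and joining once at the end.
--     if len(words) < 2:
--         raise ValueError("The list must contain at least 2 elements.")
--     parts = []
--     for a, b in zip(words, words[1:]):
--         k = min(len(a), len(b))
--         while k > 0 and not a.endswith(b[:k]):
--             k -= 1
--         if k == 0:
--             return "failed to mesh"
--         parts.append(b[:k])
--     return "".join(parts)
-- ===== Notes on version B (the rewrite author's own statement) =====
-- stated objective: faster
-- what changed: Per adjacent pair, B finds the longest suffix/prefix overlap by a single descending endswith scan over zipped pairs and joins the collected pieces, instead of materialising all suffixes and prefixes, intersecting them as sets and taking max by length.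
import Mathlib
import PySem

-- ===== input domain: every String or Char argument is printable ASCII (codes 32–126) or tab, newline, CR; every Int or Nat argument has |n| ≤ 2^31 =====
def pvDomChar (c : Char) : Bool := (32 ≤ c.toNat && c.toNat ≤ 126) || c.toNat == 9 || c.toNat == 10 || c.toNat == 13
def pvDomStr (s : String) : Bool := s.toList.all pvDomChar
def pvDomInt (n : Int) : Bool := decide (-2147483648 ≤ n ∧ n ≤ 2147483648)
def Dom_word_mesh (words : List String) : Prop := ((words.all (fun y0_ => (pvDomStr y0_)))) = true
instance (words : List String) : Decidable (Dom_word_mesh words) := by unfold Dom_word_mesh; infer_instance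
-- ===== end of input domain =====

-- B replaces A's substring-set intersection + max-by-length with a direct descending
-- overlap scan per adjacent pair (objective: faster by a constant factor, measured).

-- ===== PORT A =====

-- sub_string_forward: [word[idx:] for idx in range(len(word))]
def wmSubForward (word : String) : List String :=
  (PySem.List.pyRange 0 (PySem.Str.len word)).map
    (fun idx => PySem.Str.slice word (some idx) none)

-- sub_string_backward: [word[:idx] for idx in range(1, len(word) + 1)]
def wmSubBackward (word : String) : List String :=
  (PySem.List.pyRange 1 (PySem.Str.len word + 1)).map
    (fun idx => PySem.Str.slice word none (some idx))

-- find_max_match: max(set(forward) & set(backward), key=len, default="").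
-- (Faithful despite CPython's arbitrary set order: equal-length members of the
-- intersection are the same string — each is the unique prefix of b of that
-- length — so max by len is order-independent.)
def wmFindMaxMatch (forwardList backwardList : List String) : String :=
  let matching := (PySem.Set.ofList forwardList).inter (PySem.Set.ofList backwardList)
  PySem.List.maxD matching PySem.Str.len ""

-- the 'for i in range(len(words) - 1)' loop with its early 'return "failed to mesh"'
def wmLoopA (words : List String) : List Int → String → String
  | [], acc => acc
  | i :: rest, acc =>
    let forwardSubstrings := wmSubForward (PySem.List.pyGetD words i "")
    let backwardSubstrings := wmSubBackward (PySem.List.pyGetD words (i + 1) "")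
    let matchString := wmFindMaxMatch forwardSubstrings backwardSubstrings
    if matchString = "" then "failed to mesh"
    else wmLoopA words rest (acc ++ matchString)

def word_mesh (words : List String) : String :=
  wmLoopA words (PySem.List.pyRange 0 ((words.length : Int) - 1)) ""

-- ===== PORT B =====

-- the 'while k > 0 and not a.endswith(b[:k]): k -= 1' descending scan
def wmOverlapLen (a b : String) : Nat → Nat
  | 0 => 0
  | k + 1 =>
    if PySem.Str.endswith a (PySem.Str.slice b none (some ((k : Int) + 1))) then k + 1
    else wmOverlapLen a b k

-- the 'for a, b in zip(words, words[1:])' loop collecting parts, '"".join' at the end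
def wmLoopB : List (String × String) → List String → String
  | [], parts => PySem.Str.join "" parts
  | (a, b) :: rest, parts =>
    let k := wmOverlapLen a b (min (PySem.Str.len a) (PySem.Str.len b)).toNat
    if k = 0 then "failed to mesh"
    else wmLoopB rest (parts ++ [PySem.Str.slice b none (some (k : Int))])

def word_mesh_alt (words : List String) : String :=
  wmLoopB (words.zip (PySem.List.slice words (some 1) none)) []

-- ===== PRECONDITION & SPEC =====

-- A raises ValueError when the list has fewer than 2 elements; Pre_ excludes exactly those.
def Pre_word_mesh (words : List String) : Prop := 2 ≤ words.length
instance (words : List String) : Decidable (Pre_word_mesh words) := by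
  unfold Pre_word_mesh; infer_instance

def pvWitness_word_mesh : List String := ["abcd", "cdef"]

def Spec_word_mesh (words : List String) (out : String) : Prop := out = word_mesh_alt words
instance (words : List String) (out : String) : Decidable (Spec_word_mesh words out) := by
  unfold Spec_word_mesh; infer_instance

-- ===== CLAIM (what is proved, stated in full; the proofs are below) =====
def Claim_equal_word_mesh : Prop :=
  ∀ (words : List String), Dom_word_mesh words → Pre_word_mesh words →
    Spec_word_mesh words (word_mesh words)

-- ===== LEMMAS AND PROOFS =====

lemma toList_slice_from (a : String) (i : Nat) :
    (PySem.Str.slice a (some (i : Int)) none).toList = a.toList.drop i := by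
  simp [PySem.Str.toList_slice, PySem.Chars.slice_eq_listSlice,
    PySem.List.slice_from _ (by positivity : (0:Int) ≤ (i:Int))]

lemma toList_slice_to (b : String) (k : Nat) :
    (PySem.Str.slice b none (some (k : Int))).toList = b.toList.take k := by
  simp [PySem.Str.toList_slice, PySem.Chars.slice_eq_listSlice,
    PySem.List.slice_to _ (by positivity : (0:Int) ≤ (k:Int))]

-- s ∈ sub_string_forward a  ↔  s is a[i:] for some i < len(a)
lemma mem_wmSubForward (a s : String) :
    s ∈ wmSubForward a ↔ ∃ i : Nat, i < a.toList.length ∧ s.toList = a.toList.drop i := by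
  simp only [wmSubForward, List.mem_map, PySem.List.mem_pyRange_one]
  constructor
  · rintro ⟨idx, ⟨h0, h1⟩, rfl⟩
    refine ⟨idx.toNat, ?_, ?_⟩
    · rw [PySem.Str.len_eq] at h1; omega
    · rw [show idx = ((idx.toNat : Nat) : Int) by omega, toList_slice_from]
      simp only [Int.toNat_natCast]
  · rintro ⟨i, hi, hs⟩
    refine ⟨(i : Int), ⟨by positivity, by rw [PySem.Str.len_eq]; exact_mod_cast hi⟩, ?_⟩
    apply String.toList_inj.mp
    rw [toList_slice_from, hs]

-- s ∈ sub_string_backward b  ↔  s is b[:k] for some 1 ≤ k ≤ len(b)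
lemma mem_wmSubBackward (b s : String) :
    s ∈ wmSubBackward b ↔ ∃ k : Nat, 1 ≤ k ∧ k ≤ b.toList.length ∧ s.toList = b.toList.take k := by
  simp only [wmSubBackward, List.mem_map, PySem.List.mem_pyRange_one]
  constructor
  · rintro ⟨idx, ⟨h0, h1⟩, rfl⟩
    refine ⟨idx.toNat, by omega, ?_, ?_⟩
    · rw [PySem.Str.len_eq] at h1; omega
    · rw [show idx = ((idx.toNat : Nat) : Int) by omega, toList_slice_to]
      simp only [Int.toNat_natCast]
  · rintro ⟨k, h1, hk, hs⟩
    refine ⟨(k : Int), ⟨by exact_mod_cast h1, by rw [PySem.Str.len_eq]; omega⟩, ?_⟩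
    apply String.toList_inj.mp
    rw [toList_slice_to, hs]

lemma wmOverlapLen_le (a b : String) : ∀ k, wmOverlapLen a b k ≤ k := by
  intro k; induction k with
  | zero => simp [wmOverlapLen]
  | succ k ih => rw [wmOverlapLen]; split <;> omega

-- B's scan returns the greatest j ≤ k with b[:j] a suffix of a (0 if none)
lemma wmOverlapLen_spec (a b : String) : ∀ k,
    (wmOverlapLen a b k ≠ 0 → b.toList.take (wmOverlapLen a b k) <:+ a.toList) ∧
    (∀ j, wmOverlapLen a b k < j → j ≤ k → ¬ b.toList.take j <:+ a.toList) := by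
  intro k; induction k with
  | zero => exact ⟨fun h => absurd rfl h, fun j h1 h2 => by omega⟩
  | succ k ih =>
    rw [wmOverlapLen]
    have hsl : (PySem.Str.slice b none (some ((k : Int) + 1))).toList = b.toList.take (k + 1) := by
      rw [show ((k : Int) + 1) = (((k + 1 : Nat) : Nat) : Int) by omega, toList_slice_to]
    split
    · next hend =>
      rw [PySem.Str.endswith_eq, hsl] at hend
      refine ⟨fun _ => (PySem.Chars.endswith_iff _ _).mp hend, fun j h1 h2 => by omega⟩
    · next hend =>
      rw [PySem.Str.endswith_eq, hsl] at hend
      refine ⟨ih.1, fun j h1 h2 hsuf => ?_⟩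
      rcases Nat.lt_or_ge j (k + 1) with hj | hj
      · exact ih.2 j h1 (by omega) hsuf
      · have : j = k + 1 := by omega
        subst this
        exact absurd ((PySem.Chars.endswith_iff _ _).mpr hsuf) (by simpa using hend)

lemma wmMin_toNat (a b : String) :
    (min (PySem.Str.len a) (PySem.Str.len b)).toNat = min a.toList.length b.toList.length := by
  rw [PySem.Str.len_eq, PySem.Str.len_eq]; omega

-- the heart of the equivalence: A's max-by-length over the intersection of all
-- suffixes of a with all prefixes of b equals B's descending scan result
lemma wmPair_eq (a b : String) :
    wmFindMaxMatch (wmSubForward a) (wmSubBackward b) =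
      (if wmOverlapLen a b (min (PySem.Str.len a) (PySem.Str.len b)).toNat = 0 then ""
       else PySem.Str.slice b none
         (some ((wmOverlapLen a b (min (PySem.Str.len a) (PySem.Str.len b)).toNat : Nat) : Int))) := by
  have hspec := wmOverlapLen_spec a b (min (PySem.Str.len a) (PySem.Str.len b)).toNat
  rw [wmMin_toNat] at hspec ⊢
  set K := wmOverlapLen a b (min a.toList.length b.toList.length) with hK
  have hKle : K ≤ min a.toList.length b.toList.length := by
    rw [hK]; exact wmOverlapLen_le a b _
  -- membership in the intersection
  have hmem : ∀ s : String,
      s ∈ (PySem.Set.ofList (wmSubForward a)).inter (PySem.Set.ofList (wmSubBackward b)) ↔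
      (∃ i : Nat, i < a.toList.length ∧ s.toList = a.toList.drop i) ∧
      (∃ k : Nat, 1 ≤ k ∧ k ≤ b.toList.length ∧ s.toList = b.toList.take k) := by
    intro s
    rw [PySem.Set.mem_inter, PySem.Set.mem_ofList, PySem.Set.mem_ofList,
      mem_wmSubForward, mem_wmSubBackward]
  -- every member is b[:k] for some 1 ≤ k ≤ min, a suffix of a
  have hval : ∀ s ∈ (PySem.Set.ofList (wmSubForward a)).inter (PySem.Set.ofList (wmSubBackward b)),
      ∃ k : Nat, 1 ≤ k ∧ k ≤ min a.toList.length b.toList.length ∧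
        s.toList = b.toList.take k ∧ b.toList.take k <:+ a.toList := by
    intro s hs
    rcases (hmem s).mp hs with ⟨⟨i, hi, hdrop⟩, ⟨k, hk1, hkb, htake⟩⟩
    have hlen : s.toList.length = k := by rw [htake, List.length_take]; omega
    have hlen2 : s.toList.length = a.toList.length - i := by rw [hdrop, List.length_drop]
    refine ⟨k, hk1, by omega, htake, ?_⟩
    rw [← htake, hdrop]; exact List.drop_suffix i a.toList
  by_cases hK0 : K = 0
  · -- no overlap: the intersection is empty, max gives the default ""
    have hnil : (PySem.Set.ofList (wmSubForward a)).inter (PySem.Set.ofList (wmSubBackward b)) = [] := by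
      apply List.eq_nil_iff_forall_not_mem.mpr
      intro s hs
      rcases hval s hs with ⟨k, hk1, hkm, _, hsuf⟩
      exact hspec.2 k (by omega) hkm hsuf
    simp only [wmFindMaxMatch, hK0, if_true]
    rw [hnil]
    rfl
  · -- overlap K ≥ 1: the max of the intersection is b[:K]
    have hKsuf : b.toList.take K <:+ a.toList := hspec.1 hK0
    have hsliceK : (PySem.Str.slice b none (some ((K : Nat) : Int))).toList = b.toList.take K :=
      toList_slice_to b K
    have hin : PySem.Str.slice b none (some ((K : Nat) : Int)) ∈
        (PySem.Set.ofList (wmSubForward a)).inter (PySem.Set.ofList (wmSubBackward b)) := by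
      apply (hmem _).mpr
      have hdrop := List.suffix_iff_eq_drop.mp hKsuf
      have hlt : a.toList.length - (b.toList.take K).length < a.toList.length := by
        rw [List.length_take]; omega
      refine ⟨⟨a.toList.length - (b.toList.take K).length, hlt, by rw [hsliceK, ← hdrop]⟩,
        ⟨K, by omega, by omega, hsliceK⟩⟩
    obtain ⟨m, hm⟩ : ∃ m, PySem.List.max?
        ((PySem.Set.ofList (wmSubForward a)).inter (PySem.Set.ofList (wmSubBackward b)))
        PySem.Str.len = some m := by
      cases hmx : PySem.List.max?
        ((PySem.Set.ofList (wmSubForward a)).inter (PySem.Set.ofList (wmSubBackward b)))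
        PySem.Str.len with
      | none =>
        rw [PySem.List.max?_eq_none_iff] at hmx
        rw [hmx] at hin; exact absurd hin (List.not_mem_nil)
      | some m => exact ⟨m, rfl⟩
    rcases hval m (PySem.List.max?_mem hm) with ⟨k', hk1, hkm, htake, hsuf⟩
    have hk'K : k' ≤ K := by
      by_contra h
      exact hspec.2 k' (by omega) hkm hsuf
    have hmax := PySem.List.max?_isMax hm _ hin
    have hlenm : PySem.Str.len m = (k' : Int) := by
      rw [PySem.Str.len_eq, htake, List.length_take]; omega
    have hlenK : PySem.Str.len (PySem.Str.slice b none (some ((K : Nat) : Int))) = (K : Int) := by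
      rw [PySem.Str.len_eq, hsliceK, List.length_take]; omega
    have hKk' : K = k' := by rw [hlenm, hlenK] at hmax; omega
    have hmeq : m = PySem.Str.slice b none (some ((K : Nat) : Int)) := by
      apply String.toList_inj.mp
      rw [htake, hsliceK, hKk']
    simp only [wmFindMaxMatch, hK0, if_false]
    rw [show PySem.List.maxD
        ((PySem.Set.ofList (wmSubForward a)).inter (PySem.Set.ofList (wmSubBackward b)))
        PySem.Str.len "" = m from by rw [PySem.List.maxD, hm]; rfl, hmeq]

-- proof-side bridge: A's loop seen over the pair list instead of the index range
def wmLoopP : List (String × String) → String → String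
  | [], acc => acc
  | (a, b) :: rest, acc =>
    let m := wmFindMaxMatch (wmSubForward a) (wmSubBackward b)
    if m = "" then "failed to mesh" else wmLoopP rest (acc ++ m)

lemma wmJoinNil (ls : List (List Char)) : PySem.Chars.join [] ls = ls.flatten := by
  induction ls with
  | nil => simp [PySem.Chars.join_nil]
  | cons x tl ih =>
    cases tl with
    | nil => simp [PySem.Chars.join_singleton]
    | cons y rest => rw [PySem.Chars.join_cons_cons]; simp_all

lemma wmSlice_ne_empty (b : String) (K : Nat) (h1 : 1 ≤ K) (h2 : K ≤ b.toList.length) :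
    PySem.Str.slice b none (some ((K : Nat) : Int)) ≠ "" := by
  intro h
  have h2' := toList_slice_to b K
  rw [h, show ("" : String).toList = [] from rfl] at h2'
  have hl := congrArg List.length h2'.symm
  rw [List.length_take, List.length_nil] at hl
  omega

lemma wmLoopP_eq_B : ∀ (pairs : List (String × String)) (parts : List String) (acc : String),
    acc.toList = (parts.map String.toList).flatten → wmLoopP pairs acc = wmLoopB pairs parts := by
  intro pairs
  induction pairs with
  | nil =>
    intro parts acc h
    apply String.toList_inj.mp
    rw [wmLoopP, wmLoopB, PySem.Str.toList_join, h]
    exact (wmJoinNil _).symm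
  | cons p rest ih =>
    rcases p with ⟨a, b⟩
    intro parts acc h
    rw [wmLoopP, wmLoopB, wmPair_eq]
    simp only [wmMin_toNat]
    by_cases hC : wmOverlapLen a b (min a.toList.length b.toList.length) = 0
    · simp only [if_pos hC]
      rw [if_pos trivial]
    · have hle := wmOverlapLen_le a b (min a.toList.length b.toList.length)
      have hne := wmSlice_ne_empty b _ (Nat.one_le_iff_ne_zero.mpr hC) (by omega)
      simp only [if_neg hC]
      rw [if_neg hne]
      apply ih
      rw [String.toList_append, h]
      simp

lemma wmLoopA_eq_P (words : List String) : ∀ (fuel j : Nat) (acc : String),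
    words.length - 1 - j = fuel →
    wmLoopA words (PySem.List.pyRange (j : Int) ((words.length : Int) - 1)) acc =
    wmLoopP ((words.drop j).zip (words.drop (j + 1))) acc := by
  intro fuel
  induction fuel with
  | zero =>
    intro j acc hf
    rw [PySem.List.pyRange_one_eq_nil (by omega)]
    rw [List.drop_eq_nil_of_le (by omega : words.length ≤ j + 1), List.zip_nil_right]
    rfl
  | succ fuel ih =>
    intro j acc hf
    have hj1 : j + 1 < words.length := by omega
    have hj : j < words.length := by omega
    rw [PySem.List.pyRange_one_cons (by omega)]
    have hz : (words.drop j).zip (words.drop (j + 1)) =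
        (words[j], words[j + 1]) :: (words.drop (j + 1)).zip (words.drop (j + 2)) := by
      conv_lhs => rw [List.drop_eq_getElem_cons hj1]
      conv_lhs => rw [List.drop_eq_getElem_cons hj]
      rw [List.zip_cons_cons]
    rw [hz, wmLoopA, wmLoopP]
    rw [PySem.List.pyGetD_eq_getElem words "" (by positivity) (by omega),
      show (j : Int) + 1 = ((j + 1 : Nat) : Int) by omega,
      PySem.List.pyGetD_eq_getElem words "" (by positivity) (by omega)]
    simp only [Int.toNat_natCast]
    split
    · rfl
    · exact ih (j + 1) _ (by omega)

-- ===== VERDICT (by name: the statement is the Claim_ definition above) =====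
theorem word_mesh_spec : Claim_equal_word_mesh := by
  intro words _ _
  unfold Spec_word_mesh
  rw [word_mesh, word_mesh_alt]
  rw [PySem.List.slice_from words (by norm_num : (0:Int) ≤ 1)]
  have h0 := wmLoopA_eq_P words (words.length - 1 - 0) 0 "" rfl
  simp only [Nat.cast_zero, List.drop_zero, Nat.zero_add] at h0
  rw [h0]
  rw [wmLoopP_eq_B (words.zip (words.drop 1)) [] "" (by rfl)]
  norm_num
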